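-- pv_equiv track=rewrite | github.com/ejpark78/nlp-utils | etl/utils/quote_utils.py | fill_empty_who
-- ===== SOURCE A (Python) =====
-- def fill_empty_who(quote_list):
--     """ 다음 발화를 모를 경우, 앞의 발화자로 채운다."""
--     # empty 발화자 처리
--     for i, item in enumerate(quote_list):
--         if len(quote_list) < i + 2:
--             break
--
--         next_item = quote_list[i + 1]
--         if item['who'] != '' and next_item['who'] == '':
--             next_item['who'] = item['who']
--             next_item['position'] = item['position']
--
--     return quote_list
-- ===== SOURCE B (Python) =====
-- def fill_empty_who(quote_list):
--     """ 다음 발화를 모를 경우, 앞의 발화자로 채운다."""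
--     if len(quote_list) < 2:
--         return quote_list
--
--     # stage 1: for each position, precompute the index of the latest preceding known speaker
--     last_known = []
--     seed = None
--     for i, item in enumerate(quote_list):
--         last_known.append(seed)
--         if item['who'] != '':
--             seed = i
--
--     # stage 2: fill each unknown speaker by random access into the original seeds
--     for item, j in zip(quote_list, last_known):
--         if item['who'] == '' and j is not None:
--             src = quote_list[j]
--             item['who'] = src['who']
--             item['position'] = src['position']
--
--     return quote_list
-- ===== Notes on version B (the rewrite author's own statement) =====
-- stated objective: alternative
-- what changed: Two staged passes: first precompute an index array last_known (for each position, the index of the latest preceding quote with a known speaker), then fill each empty speaker by random access into the original list at that index, instead of A's single in-place pass that propagates fills through quote_list[i+1] pairwise.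
-- outside the precondition, e.g. on fill_empty_who([{'who': ''}, {}]): A returns [{'who': ''}, {}], B raises KeyError
import Mathlib
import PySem

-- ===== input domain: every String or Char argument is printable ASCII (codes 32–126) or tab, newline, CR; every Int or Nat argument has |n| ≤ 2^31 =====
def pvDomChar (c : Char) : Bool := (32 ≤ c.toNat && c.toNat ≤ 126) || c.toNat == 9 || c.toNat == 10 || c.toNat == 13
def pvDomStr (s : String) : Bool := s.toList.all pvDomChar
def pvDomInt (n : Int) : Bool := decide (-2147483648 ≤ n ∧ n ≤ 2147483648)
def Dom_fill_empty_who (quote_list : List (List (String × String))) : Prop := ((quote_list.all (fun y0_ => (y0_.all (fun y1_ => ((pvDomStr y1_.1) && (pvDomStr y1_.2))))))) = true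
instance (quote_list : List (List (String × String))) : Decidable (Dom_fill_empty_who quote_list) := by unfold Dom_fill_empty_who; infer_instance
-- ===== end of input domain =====

-- B replaces A's single in-place pass (compare item i with i+1, propagate the fill forward through
-- the list) by two staged passes: precompute an index array of the latest preceding known speaker,
-- then fill empties by random access into the original seeds; return values proved equal.
-- (Both Pythons mutate the argument's dicts in place the same way; the theorems are about the return value.)

-- shared dict primitives on the assoc-list encoding (d['k'] with a default / d['k'] = v), via PySem.Dict
def dgetD (d : List (String × String)) (k dflt : String) : String :=
  (PySem.Dict.mk d).getD k dflt

def dset (d : List (String × String)) (k v : String) : List (String × String) :=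
  ((PySem.Dict.mk d).insert k v).items

-- ===== PORT A =====
-- the for-loop over enumerate(quote_list) with its break; dict reads are total via dgetD,
-- exact on Pre_ (inside Pre_ every key A reads is present)
def fillLoopA (qs : List (List (String × String))) (i : Nat) : List (List (String × String)) :=
  if _h : qs.length < i + 2 then qs
  else
    let item := qs.getD i []
    let next_item := qs.getD (i + 1) []
    let next' :=
      if dgetD item "who" "" ≠ "" ∧ dgetD next_item "who" "" = "" then
        dset (dset next_item "who" (dgetD item "who" "")) "position" (dgetD item "position" "")
      else next_item
    fillLoopA (qs.set (i + 1) next') (i + 1)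
  termination_by qs.length - i
  decreasing_by simp only [List.length_set]; omega

def fill_empty_who (quote_list : List (List (String × String))) : List (List (String × String)) :=
  fillLoopA quote_list 0

-- ===== PORT B =====
-- stage 1: last_known — per position, the index of the latest preceding quote with non-empty 'who'
def lkLoop (seed : Option Nat) (i : Nat) :
    List (List (String × String)) → List (Option Nat)
  | [] => []
  | item :: rest =>
    seed :: lkLoop (if dgetD item "who" "" ≠ "" then some i else seed) (i + 1) rest

-- stage 2 body: fill one (item, last_known) pair by random access into the original list
def fillFrom (qs : List (List (String × String)))
    (p : List (String × String) × Option Nat) : List (String × String) :=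
  if dgetD p.1 "who" "" = "" then
    match p.2 with
    | none => p.1
    | some j =>
      let src := qs.getD j []
      dset (dset p.1 "who" (dgetD src "who" "")) "position" (dgetD src "position" "")
  else p.1

def fill_empty_who_alt (quote_list : List (List (String × String))) : List (List (String × String)) :=
  if quote_list.length < 2 then quote_list
  else (quote_list.zip (lkLoop none 0 quote_list)).map (fillFrom quote_list)

-- ===== PRECONDITION & SPEC =====
-- Pre_ excludes the inputs on which the Python A raises KeyError (a quote missing 'who', or a
-- copy-source quote missing 'position'), and the thin corner where only the item after an
-- all-empty-'who' prefix lacks 'who' — there A returns unchanged only because its `and`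
-- short-circuits, while B's precomputation pass reads every 'who' and raises KeyError (see the cite).
def Pre_fill_empty_who (quote_list : List (List (String × String))) : Prop :=
  quote_list.length ≤ 1 ∨
  ((∀ d ∈ quote_list, ((PySem.Dict.mk d).get? "who").isSome = true) ∧
   ∀ p ∈ quote_list.zip quote_list.tail,
     (PySem.Dict.mk p.1).getD "who" "" ≠ "" → (PySem.Dict.mk p.2).getD "who" "" = "" →
     ((PySem.Dict.mk p.1).get? "position").isSome = true)
instance (quote_list : List (List (String × String))) : Decidable (Pre_fill_empty_who quote_list) := by
  unfold Pre_fill_empty_who; infer_instance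

def pvWitness_fill_empty_who : (List (List (String × String))) :=
  [[("who", "a"), ("position", "1")], [("who", "")], [("who", "b"), ("position", "2")]]

def Spec_fill_empty_who (quote_list : List (List (String × String))) (out : List (List (String × String))) : Prop := out = fill_empty_who_alt quote_list
instance (quote_list : List (List (String × String))) (out : List (List (String × String))) : Decidable (Spec_fill_empty_who quote_list out) := by unfold Spec_fill_empty_who; infer_instance

-- ===== CLAIM (what is proved, stated in full; the proofs are below) =====
def Claim_equal_fill_empty_who : Prop := ∀ (quote_list : List (List (String × String))), Dom_fill_empty_who quote_list → Pre_fill_empty_who quote_list → Spec_fill_empty_who quote_list (fill_empty_who quote_list)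

-- ===== LEMMAS AND PROOFS =====

-- A's loop, rephrased structurally: the element before `rest` is already final
def goA : List (String × String) → List (List (String × String)) → List (List (String × String))
  | _, [] => []
  | x, y :: rest =>
    let y' :=
      if dgetD x "who" "" ≠ "" ∧ dgetD y "who" "" = "" then
        dset (dset y "who" (dgetD x "who" "")) "position" (dgetD x "position" "")
      else y
    y' :: goA y' rest

-- common middle form: the pass carrying only the (who, position) values of the latest known speaker
def goC : Option (String × String) → List (List (String × String)) → List (List (String × String))
  | _, [] => []
  | pv, item :: rest =>
    let item' :=
      match pv with
      | none => item
      | some wp =>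
        if dgetD item "who" "" = "" then
          dset (dset item "who" wp.1) "position" wp.2
        else item
    let pv' := if dgetD item' "who" "" ≠ "" then
        some (dgetD item' "who" "", dgetD item' "position" "") else pv
    item' :: goC pv' rest

theorem getD_append_cons {α : Type} (pre : List α) (x : α) (l : List α) (d : α) :
    (pre ++ x :: l).getD pre.length d = x := by
  induction pre with
  | nil => rfl
  | cons a t ih => simp

theorem set_append_cons {α : Type} (pre : List α) (x : α) (l : List α) (v : α) :
    (pre ++ x :: l).set pre.length v = pre ++ v :: l := by
  induction pre with
  | nil => rfl
  | cons a t ih => simp [ih]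

theorem fillLoopA_eq_goA (rest : List (List (String × String))) :
    ∀ (pre : List (List (String × String))) (x : List (String × String)),
      fillLoopA (pre ++ x :: rest) pre.length = pre ++ x :: goA x rest := by
  induction rest with
  | nil =>
    intro pre x
    rw [fillLoopA]
    simp [goA]
  | cons y rest' ih =>
    intro pre x
    rw [fillLoopA]
    have hlen : ¬ (pre ++ x :: y :: rest').length < pre.length + 2 := by
      simp only [List.length_append, List.length_cons]; omega
    simp only [hlen, dite_false]
    have h1 : (pre ++ x :: y :: rest').getD pre.length ([] : List (String × String)) = x :=
      getD_append_cons pre x (y :: rest') []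
    have h2 : (pre ++ x :: y :: rest').getD (pre.length + 1) ([] : List (String × String)) = y := by
      have := getD_append_cons (pre ++ [x]) y rest' ([] : List (String × String))
      simp only [List.length_append, List.length_cons, List.length_nil, List.append_assoc,
        List.cons_append, List.nil_append] at this
      exact this
    rw [h1, h2]
    set y' := if dgetD x "who" "" ≠ "" ∧ dgetD y "who" "" = "" then
        dset (dset y "who" (dgetD x "who" "")) "position" (dgetD x "position" "")
      else y with hy'
    have hset : (pre ++ x :: y :: rest').set (pre.length + 1) y' = pre ++ x :: y' :: rest' := by
      have := set_append_cons (pre ++ [x]) y rest' y'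
      simp only [List.length_append, List.length_cons, List.length_nil, List.append_assoc,
        List.cons_append, List.nil_append] at this
      exact this
    rw [hset, show pre ++ x :: y' :: rest' = (pre ++ [x]) ++ y' :: rest' by simp]
    have := ih (pre ++ [x]) y'
    simp only [List.length_append, List.length_cons, List.length_nil, Nat.zero_add] at this
    rw [this]
    simp [goA, ← hy']

theorem dgetD_dset_who (d : List (String × String)) (w p : String) :
    dgetD (dset (dset d "who" w) "position" p) "who" "" = w := by
  show (((PySem.Dict.mk d).insert "who" w).insert "position" p).getD "who" "" = w
  rw [PySem.Dict.getD_insert, if_neg (by decide), PySem.Dict.getD_insert, if_pos rfl]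

theorem dgetD_dset_pos (d : List (String × String)) (w p : String) :
    dgetD (dset (dset d "who" w) "position" p) "position" "" = p := by
  show (((PySem.Dict.mk d).insert "who" w).insert "position" p).getD "position" "" = p
  rw [PySem.Dict.getD_insert, if_pos rfl]

theorem goA_eq_goC (rest : List (List (String × String))) :
    ∀ (x : List (String × String)),
      goA x rest = goC (if dgetD x "who" "" = "" then none
        else some (dgetD x "who" "", dgetD x "position" "")) rest := by
  induction rest with
  | nil => intro x; by_cases hx : dgetD x "who" "" = "" <;> simp [goA, goC]
  | cons y rest' ih =>
    intro x
    by_cases hx : dgetD x "who" "" = ""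
    · simp only [goA, goC, hx, if_pos, ne_eq, not_true_eq_false, false_and, if_false]
      rw [ih y]
      by_cases hy : dgetD y "who" "" = "" <;> simp [hy]
    · simp only [if_neg hx]
      by_cases hy : dgetD y "who" "" = ""
      · simp only [goA, goC, hx, hy, ne_eq, not_false_eq_true, true_and, if_pos]
        rw [ih]
        simp [dgetD_dset_who, dgetD_dset_pos, hx]
      · simp only [goA, goC, hy, and_false, if_neg, not_false_eq_true]
        rw [ih y]
        simp [hy]

-- the invariant tying stage 1's seed index to the carried (who, position) values
def InvSeed (qs : List (List (String × String)))
    (seed : Option Nat) (pv : Option (String × String)) : Prop :=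
  (seed = none ∧ pv = none) ∨
  ∃ j, seed = some j ∧ dgetD (qs.getD j []) "who" "" ≠ "" ∧
    pv = some (dgetD (qs.getD j []) "who" "", dgetD (qs.getD j []) "position" "")

theorem zip_lk_eq_goC (qs : List (List (String × String))) (rest : List (List (String × String))) :
    ∀ (i : Nat) (seed : Option Nat) (pv : Option (String × String)),
      qs.drop i = rest → InvSeed qs seed pv →
      (rest.zip (lkLoop seed i rest)).map (fillFrom qs) = goC pv rest := by
  induction rest with
  | nil => intro i seed pv _ _; rfl
  | cons item rest' ih =>
    intro i seed pv hdrop hinv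
    have hget : qs.getD i [] = item := by
      have h0 : qs[i]? = some item := by
        have := (List.getElem?_drop (xs := qs) (i := i) (j := 0))
        rw [hdrop] at this; simpa using this.symm
      simp [List.getD, h0]
    have hdrop' : qs.drop (i + 1) = rest' := by
      have : qs.drop (i + 1) = (qs.drop i).drop 1 := by
        rw [List.drop_drop]
      rw [this, hdrop]; rfl
    simp only [lkLoop, List.zip_cons_cons, List.map_cons]
    rcases hinv with ⟨hs, hp⟩ | ⟨j, hs, hw, hp⟩
    · subst hs; subst hp
      have hfill : fillFrom qs (item, none) = item := by
        unfold fillFrom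
        by_cases h : dgetD item "who" "" = "" <;> simp [h]
      rw [hfill]
      simp only [goC]
      by_cases hw : dgetD item "who" "" = ""
      · simp only [hw, ne_eq, not_true_eq_false, if_false]
        exact congrArg _ (ih (i + 1) none none hdrop' (Or.inl ⟨rfl, rfl⟩))
      · simp only [ne_eq, hw, not_false_eq_true, if_pos]
        refine congrArg _ (ih (i + 1) (some i) _ hdrop' (Or.inr ⟨i, rfl, ?_, ?_⟩))
        · rw [hget]; exact hw
        · rw [hget]
    · subst hs; subst hp
      by_cases he : dgetD item "who" "" = ""
      · -- empty: B fills from qs[j]; C fills from pv = fields of qs[j]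
        have hfill : fillFrom qs (item, some j) =
            dset (dset item "who" (dgetD (qs.getD j []) "who" ""))
              "position" (dgetD (qs.getD j []) "position" "") := by
          unfold fillFrom; simp [he]
        rw [hfill]
        simp only [goC, he, if_pos]
        have hwho' := dgetD_dset_who item (dgetD (qs.getD j []) "who" "") (dgetD (qs.getD j []) "position" "")
        have hpos' := dgetD_dset_pos item (dgetD (qs.getD j []) "who" "") (dgetD (qs.getD j []) "position" "")
        simp only [ne_eq, hwho', hw, not_false_eq_true, if_pos, hpos']
        refine congrArg _ (ih (i + 1) (some j) _ hdrop' (Or.inr ⟨j, rfl, hw, rfl⟩))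
      · have hfill : fillFrom qs (item, some j) = item := by
          unfold fillFrom; simp [he]
        rw [hfill]
        simp only [goC, he, if_neg, ne_eq, not_false_eq_true, if_pos]
        refine congrArg _ (ih (i + 1) (some i) _ hdrop' (Or.inr ⟨i, rfl, ?_, ?_⟩))
        · rw [hget]; exact he
        · rw [hget]

theorem ports_agree (quote_list : List (List (String × String))) :
    fill_empty_who quote_list = fill_empty_who_alt quote_list := by
  match quote_list with
  | [] => rw [fill_empty_who, fillLoopA]; rfl
  | [x] => rw [fill_empty_who, fillLoopA]; rfl
  | x :: y :: r =>
    have hA : fill_empty_who (x :: y :: r) = x :: goA x (y :: r) := by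
      have := fillLoopA_eq_goA (y :: r) [] x
      simpa [fill_empty_who] using this
    set qs := x :: y :: r with hqs
    have hB : fill_empty_who_alt qs
        = fillFrom qs (x, none) :: ((y :: r).zip (lkLoop (if dgetD x "who" "" ≠ "" then some 0 else none) 1 (y :: r))).map (fillFrom qs) := by
      simp only [fill_empty_who_alt, hqs, List.length_cons]
      rw [if_neg (by omega)]
      simp [lkLoop]
    have hhead : fillFrom qs (x, none) = x := by
      unfold fillFrom
      by_cases h : dgetD x "who" "" = "" <;> simp [h]
    have htail : ((y :: r).zip (lkLoop (if dgetD x "who" "" ≠ "" then some 0 else none) 1 (y :: r))).map (fillFrom qs)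
        = goC (if dgetD x "who" "" = "" then none
            else some (dgetD x "who" "", dgetD x "position" "")) (y :: r) := by
      apply zip_lk_eq_goC qs (y :: r) 1
      · rfl
      · by_cases hx : dgetD x "who" "" = ""
        · simp only [hx, ne_eq, not_true_eq_false, if_false, if_pos]
          exact Or.inl ⟨rfl, rfl⟩
        · simp only [hx, ne_eq, not_false_eq_true, if_pos]
          exact Or.inr ⟨0, rfl, by simpa [hqs] using hx, by simp [hqs]⟩
    rw [hA, hB, hhead, htail, goA_eq_goC]

-- ===== VERDICT (by name: the statement is the Claim_ definition above) =====
theorem fill_empty_who_spec : Claim_equal_fill_empty_who := by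
  intro quote_list _ _
  unfold Spec_fill_empty_who
  exact ports_agree quote_list
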